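-- pv_equiv track=rewrite | github.com/asapcal/code-lab | beecrowdvl/exam/criptografia.py | criptografar
-- ===== SOURCE A (Python) =====
-- def criptografar(texto):
--     # Primeira etapa: desloca caracteres alfabéticos 3 posições para a direita
--     primeira_etapa = ""
--     for char in texto:
--         if char.isalpha():  # Só aplica o deslocamento se for letra
--             primeira_etapa += chr(ord(char) + 3)
--         else:
--             primeira_etapa += char
--
--     # Segunda etapa: inverte a string
--     segunda_etapa = primeira_etapa[::-1]
--
--     # Terceira etapa: desloca a segunda metade uma posição para a esquerda
--     metade = len(segunda_etapa) // 2
--     terceira_etapa = (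
--         segunda_etapa[:metade] +
--         ''.join(chr(ord(char) - 1) for char in segunda_etapa[metade:])
--     )
--
--     return terceira_etapa
-- ===== SOURCE B (Python) =====
-- def criptografar(texto):
--     n = len(texto)
--     h = n // 2
--     out = []
--     for j in range(n):
--         c = texto[n - 1 - j]
--         code = ord(c) + (3 if c.isalpha() else 0) - (1 if j >= h else 0)
--         out.append(chr(code))
--     return ''.join(out)
-- ===== Notes on version B (the rewrite author's own statement) =====
-- stated objective: alternative
-- what changed: Replaces A's three sequential string passes (shift letters, reverse, decrement second half) by a single output-indexed pass that reads texto[n-1-j] and applies both shifts arithmetically per position.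
import Mathlib
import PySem

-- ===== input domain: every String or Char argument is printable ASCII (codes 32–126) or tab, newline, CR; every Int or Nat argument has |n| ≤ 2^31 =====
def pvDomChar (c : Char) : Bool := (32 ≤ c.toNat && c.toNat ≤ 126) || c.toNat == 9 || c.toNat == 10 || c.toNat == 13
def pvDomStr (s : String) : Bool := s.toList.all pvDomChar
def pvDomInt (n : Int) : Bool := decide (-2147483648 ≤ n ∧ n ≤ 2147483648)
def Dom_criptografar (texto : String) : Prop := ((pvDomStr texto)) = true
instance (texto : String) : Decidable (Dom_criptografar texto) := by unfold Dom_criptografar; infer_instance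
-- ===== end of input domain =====

-- B: one output-indexed pass instead of A's three passes (shift, reverse, decrement half).

-- ===== PORT A =====
def criptografar (texto : String) : String :=
  -- primeira etapa: shift alphabetic chars by +3
  let primeira := texto.toList.foldl
    (fun acc c => acc ++ [if PySem.Chars.isalpha c then Char.ofNat (c.toNat + 3) else c]) []
  -- segunda etapa: s[::-1]
  let segunda := primeira.reverse
  -- terceira etapa: metade = len // 2 (length is nonnegative, so floor division is Nat division)
  let metade := segunda.length / 2
  String.ofList (segunda.take metade ++ (segunda.drop metade).map (fun c => Char.ofNat (c.toNat - 1)))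

-- ===== PORT B =====
def criptografar_alt (texto : String) : String :=
  let l := texto.toList
  let n := l.length
  let h := n / 2
  String.ofList ((List.range n).map (fun j =>
    let c := l.getD (n - 1 - j) ' '
    Char.ofNat (c.toNat + (if PySem.Chars.isalpha c then 3 else 0) - (if h ≤ j then 1 else 0))))

-- ===== PRECONDITION & SPEC =====
def Spec_criptografar (texto : String) (out : String) : Prop := out = criptografar_alt texto
instance (texto : String) (out : String) : Decidable (Spec_criptografar texto out) := by unfold Spec_criptografar; infer_instance

-- ===== CLAIM (what is proved, stated in full; the proofs are below) =====
def Claim_equal_criptografar : Prop := ∀ (texto : String), Dom_criptografar texto → Spec_criptografar texto (criptografar texto)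

-- ===== LEMMAS AND PROOFS =====

theorem pv_foldl_append {α β : Type} (f : α → β) :
    ∀ (l : List α) (acc : List β),
      l.foldl (fun acc c => acc ++ [f c]) acc = acc ++ l.map f := by
  intro l
  induction l with
  | nil => simp
  | cons a t ih => intro acc; simp [List.foldl, ih]

theorem pv_toNat_ofNat {n : Nat} (h : n < 55296) : (Char.ofNat n).toNat = n := by
  have hv : n.isValidChar := Or.inl h
  simp [Char.ofNat, hv, Char.ofNatAux, Char.toNat]

theorem pv_char_bounds {c : Char} (h : pvDomChar c = true) :
    9 ≤ c.toNat ∧ c.toNat ≤ 126 := by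
  simp [pvDomChar] at h
  omega

-- splitting a list at h and decrementing the tail, written as one indexed map
theorem pv_split (dec : Char → Char) (m : List Char) (h : Nat) (hh : h ≤ m.length) :
    m.take h ++ (m.drop h).map dec
      = (List.range m.length).map
          (fun j => if h ≤ j then dec (m.getD j ' ') else m.getD j ' ') := by
  apply List.ext_getElem
  · simp
    omega
  · intro i hi1 hi2
    have hin : i < m.length := by simpa using hi2
    simp only [List.getElem_map, List.getElem_range]
    rw [List.getD_eq_getElem m ' ' hin]
    by_cases hih : i < h
    · rw [List.getElem_append_left (by simp; omega)]
      rw [List.getElem_take]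
      rw [if_neg (by omega)]
    · rw [List.getElem_append_right (by simp; omega)]
      simp only [List.getElem_map, List.getElem_drop, List.length_take]
      rw [if_pos (by omega)]
      have hidx : h + (i - min h m.length) = i := by omega
      simp [hidx]

theorem pv_getD_rev_map (shift : Char → Char) (l : List Char) (j : Nat)
    (hj : j < l.length) :
    ((l.map shift).reverse).getD j ' ' = shift (l.getD (l.length - 1 - j) ' ') := by
  have hj' : j < ((l.map shift).reverse).length := by simpa using hj
  have hj'' : l.length - 1 - j < l.length := by omega
  rw [List.getD_eq_getElem _ ' ' hj', List.getD_eq_getElem l ' ' hj'']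
  rw [List.getElem_reverse, List.getElem_map]
  congr 2
  simp

theorem criptografar_spec : Claim_equal_criptografar := by
  intro texto hDom
  unfold Spec_criptografar criptografar criptografar_alt
  have hDom' : ∀ c ∈ texto.toList, pvDomChar c = true := by
    simpa [Dom_criptografar, pvDomStr, List.all_eq_true] using hDom
  rw [pv_foldl_append]
  simp only [List.nil_append]
  congr 1
  set l := texto.toList with hl
  set shift := fun c => if PySem.Chars.isalpha c then Char.ofNat (c.toNat + 3) else c with hshift
  set dec := fun c : Char => Char.ofNat (c.toNat - 1) with hdec
  have hlen : ((l.map shift).reverse).length = l.length := by simp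
  rw [pv_split dec ((l.map shift).reverse) (((l.map shift).reverse).length / 2)
        (Nat.div_le_self _ 2)]
  rw [hlen]
  apply List.map_congr_left
  intro j hj
  have hjn : j < l.length := List.mem_range.mp hj
  rw [pv_getD_rev_map shift l j hjn]
  have hni : l.length - 1 - j < l.length := by omega
  have hgetD : l.getD (l.length - 1 - j) ' ' = l[l.length - 1 - j] :=
    List.getD_eq_getElem l ' ' hni
  have hcdom : pvDomChar (l[l.length - 1 - j]) = true := hDom' _ (List.getElem_mem hni)
  obtain ⟨hc9, hc126⟩ := pv_char_bounds hcdom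
  rw [hgetD]
  by_cases hh : l.length / 2 ≤ j
  · rw [if_pos hh, if_pos hh]
    by_cases ha : PySem.Chars.isalpha (l[l.length - 1 - j]) = true
    · simp only [hshift, hdec, ha, if_true]
      rw [pv_toNat_ofNat (by omega)]
    · simp [hshift, hdec, ha]
  · rw [if_neg hh, if_neg hh]
    by_cases ha : PySem.Chars.isalpha (l[l.length - 1 - j]) = true
    · simp [hshift, ha]
    · simp [hshift, ha, Char.ofNat_toNat]
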